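-- pv_equiv track=rewrite | github.com/bendrissou/glade-replication | analyze-grammar.py | count
-- ===== SOURCE A (Python) =====
-- def count(grammar):
--     keys = len(grammar.keys())
--     rules = len([r for k in grammar for r in grammar[k]])
--
--     terminals = []
--     nonterminals = []
--     for k in grammar:
--         for r in grammar[k]:
--             index = 0
--             is_token = True
--             for t in r:
--                 if t and (t[0], t[-1]) == ('<','>'):
--                     nonterminals.append(t)
--                     is_token = False
--                 else:
--                     terminals.append(t)
--                     index += 1
--             if is_token and index > 1:
--                 del terminals[-index:]
--                 terminals.append(''.join(r))
--
--     return keys, rules, terminals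
-- ===== SOURCE B (Python) =====
-- def count(grammar):
--     def is_nt(t):
--         return bool(t) and t[0] == '<' and t[-1] == '>'
--
--     terminals = []
--     for rules in grammar.values():
--         for r in rules:
--             if len(r) > 1 and not any(map(is_nt, r)):
--                 terminals.append(''.join(r))
--             else:
--                 terminals.extend(t for t in r if not is_nt(t))
--     return len(grammar), sum(map(len, grammar.values())), terminals
-- ===== Notes on version B (the rewrite author's own statement) =====
-- stated objective: simpler
-- what changed: B decides each rule's shape up front (no nonterminal and length>1 => join, else keep non-nonterminal tokens), replacing A's optimistic append + del-retraction and its index/is_token/nonterminals bookkeeping; counts come from len() and sum(map(len, ...)) instead of a materialised comprehension list.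
import Mathlib
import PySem

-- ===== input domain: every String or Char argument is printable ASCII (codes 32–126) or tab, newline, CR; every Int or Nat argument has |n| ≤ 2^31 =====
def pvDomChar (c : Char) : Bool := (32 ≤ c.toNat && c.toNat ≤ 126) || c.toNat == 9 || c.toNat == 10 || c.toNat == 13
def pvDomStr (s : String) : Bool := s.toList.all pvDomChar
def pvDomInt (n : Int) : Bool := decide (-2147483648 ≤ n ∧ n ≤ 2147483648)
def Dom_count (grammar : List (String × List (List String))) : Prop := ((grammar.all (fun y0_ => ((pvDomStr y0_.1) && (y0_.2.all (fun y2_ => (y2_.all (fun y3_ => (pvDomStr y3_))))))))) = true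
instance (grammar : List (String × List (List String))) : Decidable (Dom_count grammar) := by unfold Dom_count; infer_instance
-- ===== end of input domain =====

-- B replaces A's optimistic-append-then-retract terminal collection by an up-front per-rule decision (simpler; same cost).

-- ===== PORT A =====
-- 't and (t[0], t[-1]) == ("<", ">")'
def pyIsNT (t : String) : Bool :=
  decide (t ≠ "") && (PySem.Str.pyGet? t 0 == some '<' && PySem.Str.pyGet? t (-1) == some '>')

-- the body of 'for r in grammar[k]: ...' acting on the state (terminals, nonterminals)
def countRuleA (st : List String × List String) (r : List String) : List String × List String :=
  let s := r.foldl
    (fun (acc : List String × List String × Int × Bool) t =>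
      if pyIsNT t then (acc.1, acc.2.1 ++ [t], acc.2.2.1, false)
      else (acc.1 ++ [t], acc.2.1, acc.2.2.1 + 1, acc.2.2.2))
    (st.1, st.2, (0 : Int), true)
  if s.2.2.2 && decide (s.2.2.1 > 1) then
    (PySem.List.slice s.1 none (some (-s.2.2.1)) ++ [PySem.Str.join "" r], s.2.1)
  else (s.1, s.2.1)

def count (grammar : List (String × List (List String))) : Int × Int × List String :=
  let d := PySem.Dict.ofList grammar
  let keys : Int := d.keys.length
  let rules : Int := (d.keys.foldl (fun acc k => acc ++ d.getD k []) ([] : List (List String))).length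
  let tn := d.keys.foldl (fun st k => (d.getD k []).foldl countRuleA st)
    (([], []) : List String × List String)
  (keys, rules, tn.1)

-- ===== PORT B =====
def isNT_alt (t : String) : Bool :=
  decide (t ≠ "") && (PySem.Str.pyGet? t 0 == some '<') && (PySem.Str.pyGet? t (-1) == some '>')

def count_alt (grammar : List (String × List (List String))) : Int × Int × List String :=
  let d := PySem.Dict.ofList grammar
  let terminals := d.values.foldl
    (fun ter rules => rules.foldl
      (fun ter r =>
        if decide (r.length > 1) && !(r.any isNT_alt) then ter ++ [PySem.Str.join "" r]
        else ter ++ r.filter (fun t => !isNT_alt t))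
      ter)
    ([] : List String)
  ((d.size : Int), ((d.values.map (fun rs => rs.length)).sum : Int), terminals)

-- ===== PRECONDITION & SPEC =====
def Spec_count (grammar : List (String × List (List String))) (out : Int × Int × List String) : Prop := out = count_alt grammar
instance (grammar : List (String × List (List String))) (out : Int × Int × List String) : Decidable (Spec_count grammar out) := by unfold Spec_count; infer_instance

-- ===== CLAIM (what is proved, stated in full; the proofs are below) =====
def Claim_equal_count : Prop := ∀ (grammar : List (String × List (List String))), Dom_count grammar → Spec_count grammar (count grammar)

-- ===== LEMMAS AND PROOFS =====

theorem isNT_eq : isNT_alt = pyIsNT := by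
  funext t; simp [isNT_alt, pyIsNT, Bool.and_assoc]

-- B's per-rule contribution to the terminals list
def contribB (r : List String) : List String :=
  if decide (r.length > 1) && !(r.any isNT_alt) then [PySem.Str.join "" r]
  else r.filter (fun t => !isNT_alt t)

theorem innerFoldA (r : List String) (ter nt : List String) (i : Int) (b : Bool) :
    r.foldl
      (fun (acc : List String × List String × Int × Bool) t =>
        if pyIsNT t then (acc.1, acc.2.1 ++ [t], acc.2.2.1, false)
        else (acc.1 ++ [t], acc.2.1, acc.2.2.1 + 1, acc.2.2.2))
      (ter, nt, i, b)
    = (ter ++ r.filter (fun t => !pyIsNT t), nt ++ r.filter pyIsNT,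
       i + ((r.filter (fun t => !pyIsNT t)).length : Int), b && !(r.any pyIsNT)) := by
  induction r generalizing ter nt i b with
  | nil => simp
  | cons t r ih =>
    by_cases h : pyIsNT t = true
    · simp [List.foldl_cons, h, ih]
    · simp only [Bool.not_eq_true] at h
      simp [List.foldl_cons, h, ih]
      omega

theorem ruleA_eq (st : List String × List String) (r : List String) :
    countRuleA st r = (st.1 ++ contribB r, st.2 ++ r.filter pyIsNT) := by
  unfold countRuleA contribB
  rw [isNT_eq, innerFoldA]
  by_cases hany : r.any pyIsNT = true
  · simp [hany]
  · simp only [Bool.not_eq_true] at hany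
    have hfil : r.filter (fun t => !pyIsNT t) = r := by
      apply List.filter_eq_self.mpr
      intro a ha
      have := List.any_eq_false.mp (by simpa using hany) a ha
      simp [this]
    rw [hfil]
    by_cases hlen : r.length > 1
    · have hpos : 0 < r.length := by omega
      simp only [hany, Bool.not_false, Bool.and_true, Bool.true_and, zero_add, gt_iff_lt]
      rw [if_pos (decide_eq_true (by exact_mod_cast hlen)),
          if_pos (decide_eq_true hlen)]
      rw [PySem.List.slice_to_neg_natCast (st.1 ++ r) r.length hpos]
      simp
    · simp only [hany, Bool.not_false, Bool.and_true, Bool.true_and, zero_add, gt_iff_lt]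
      rw [if_neg (by simp only [decide_eq_true_eq]; omega),
          if_neg (by simp only [decide_eq_true_eq]; omega)]

theorem stepEq :
    (fun (ter : List String) (r : List String) => ter ++ contribB r)
    = (fun ter r =>
        if decide (r.length > 1) && !(r.any isNT_alt) then ter ++ [PySem.Str.join "" r]
        else ter ++ r.filter (fun t => !isNT_alt t)) := by
  funext ter r
  unfold contribB
  split_ifs <;> rfl

-- A's fold over a list of rules, first component
theorem rulesFoldA (rs : List (List String)) (st : List String × List String) :
    (rs.foldl countRuleA st).1 = rs.foldl (fun ter r => ter ++ contribB r) st.1 := by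
  induction rs generalizing st with
  | nil => rfl
  | cons r rs ih => rw [List.foldl_cons, List.foldl_cons, ih, ruleA_eq]

theorem outerFoldA (L : List (List (List String))) (st : List String × List String) :
    (L.foldl (fun st rs => rs.foldl countRuleA st) st).1
    = L.foldl (fun ter rs => rs.foldl (fun ter r => ter ++ contribB r) ter) st.1 := by
  induction L generalizing st with
  | nil => rfl
  | cons rs L ih => rw [List.foldl_cons, List.foldl_cons, ih, rulesFoldA]

theorem lenConcatFold (L : List (List (List String))) (acc : List (List String)) :
    (L.foldl (fun acc rs => acc ++ rs) acc).length
      = acc.length + (L.map (fun rs => rs.length)).sum := by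
  induction L generalizing acc with
  | nil => simp
  | cons rs L ih => simp [List.foldl_cons, ih]; omega

-- ===== VERDICT (by name: the statement is the Claim_ definition above) =====
theorem count_spec : Claim_equal_count := by
  intro grammar _
  unfold Spec_count count count_alt
  have hnd : (PySem.Dict.ofList grammar).keys.Nodup := PySem.Dict.nodup_keys_ofList grammar
  set d := PySem.Dict.ofList grammar with hd
  have hvals : d.values = d.keys.map (fun k => d.getD k []) :=
    PySem.Dict.values_eq_map_keys d hnd []
  refine Prod.ext ?_ (Prod.ext ?_ ?_)
  · simp [PySem.Dict.keys, PySem.Dict.size]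
  · simp only [hvals]
    rw [show (d.keys.foldl (fun acc k => acc ++ d.getD k []) [])
        = ((d.keys.map (fun k => d.getD k [])).foldl (fun acc rs => acc ++ rs) []) by
      rw [List.foldl_map]]
    rw [lenConcatFold]
    simp [List.map_map, Function.comp_def]
  · simp only [hvals]
    rw [show (d.keys.foldl (fun st k => (d.getD k []).foldl countRuleA st) (([], []) : List String × List String))
        = ((d.keys.map (fun k => d.getD k [])).foldl (fun st rs => rs.foldl countRuleA st) (([], []) : List String × List String)) by
      rw [List.foldl_map]]
    rw [outerFoldA]
    rw [List.foldl_map]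
    simp only [stepEq]
    rw [List.foldl_map]
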